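-- pv_equiv track=rewrite | github.com/bradyz/sandbox | hackerrank/strings/weighted_uniform_strings.py | solve
-- ===== SOURCE A (Python) =====
-- def alpha(c):
--     return ord(c) - ord('a') + 1
--
-- def solve(s):
--     scores = set()
--
--     scores.add(alpha(s[0]))
--
--     x = 1
--
--     for i in range(1, len(s)):
--         if s[i] == s[i-1]:
--             x += 1
--         else:
--             x = 1
--
--         scores.add(x * alpha(s[i]))
--
--     return scores
-- ===== SOURCE B (Python) =====
-- def solve(s):
--     n = len(s)
--     bounds = [0] + [i for i in range(1, n) if s[i] != s[i - 1]] + [n]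
--     return {k * (ord(s[a]) - ord('a') + 1)
--             for a, b in zip(bounds, bounds[1:])
--             for k in range(1, b - a + 1)}
-- ===== Notes on version B (the rewrite author's own statement) =====
-- stated objective: alternative
-- what changed: B replaces A's stateful left-to-right scan (run counter reset per position, set.add per position) by a staged declarative pipeline: a comprehension collects the run-boundary indices, zip of consecutive boundaries yields the segments, one nested comprehension expands each segment into its multiples, and a single set() call dedups; B also returns the empty set on the empty string where A raises IndexError.
import Mathlib
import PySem

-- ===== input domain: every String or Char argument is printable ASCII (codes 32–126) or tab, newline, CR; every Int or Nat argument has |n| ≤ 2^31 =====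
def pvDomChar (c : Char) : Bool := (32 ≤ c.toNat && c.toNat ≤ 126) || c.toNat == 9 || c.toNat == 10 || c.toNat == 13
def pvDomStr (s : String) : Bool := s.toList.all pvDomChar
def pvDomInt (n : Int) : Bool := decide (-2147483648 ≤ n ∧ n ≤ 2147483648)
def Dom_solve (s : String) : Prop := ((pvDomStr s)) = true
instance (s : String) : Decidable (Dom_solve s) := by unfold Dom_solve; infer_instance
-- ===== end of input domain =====

-- B replaces A's stateful scan (a reset counter feeding set.add at every position) by a
-- staged pipeline: run boundaries via a comprehension, consecutive bounds zipped into
-- segments, one multiples-expansion comprehension, one final set() (objective: alternative).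

-- ===== PORT A =====
def pvAlpha (c : Char) : Int := (c.toNat : Int) - 97 + 1

def solveLoopA (prev : Char) (x : Int) (scores : PySem.Set Int) : List Char → PySem.Set Int
  | [] => scores
  | c :: rest =>
    let x' := if c == prev then x + 1 else 1
    solveLoopA c x' (PySem.Set.add scores (x' * pvAlpha c)) rest

def solve (s : String) : List Int :=
  match s.toList with
  | [] => []
  | c0 :: rest => solveLoopA c0 1 (PySem.Set.add PySem.Set.empty (pvAlpha c0)) rest

-- ===== PORT B =====
-- `[i for i in range(1, n) if s[i] != s[i-1]]`; every i and i-1 is in range, so pyGetD's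
-- default ' ' is never read (exact there).
def pvCuts (cs : List Char) : List Int :=
  (PySem.List.pyRange 1 (cs.length : Int) 1).filter
    (fun i => !(PySem.List.pyGetD cs i ' ' == PySem.List.pyGetD cs (i - 1) ' '))

-- the set comprehension over zip(bounds, bounds[1:]): expand each segment's multiples
def pvProds (cs : List Char) (bounds : List Int) : List Int :=
  (bounds.zip (bounds.drop 1)).flatMap
    (fun p => (PySem.List.pyRange 1 (p.2 - p.1 + 1) 1).map
      (fun k => k * (((PySem.List.pyGetD cs p.1 ' ').toNat : Int) - 97 + 1)))

def solve_alt (s : String) : List Int :=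
  let cs := s.toList
  let bounds : List Int := 0 :: pvCuts cs ++ [(cs.length : Int)]
  PySem.Set.ofList (pvProds cs bounds)

-- ===== PRECONDITION & SPEC =====
-- Pre_ excludes only the empty string, on which A raises IndexError (it evaluates s[0]).
def Pre_solve (s : String) : Prop := s ≠ ""
instance (s : String) : Decidable (Pre_solve s) := by unfold Pre_solve; infer_instance
def pvWitness_solve : String := "aab"

def Spec_solve (s : String) (out : List Int) : Prop := out = solve_alt s
instance (s : String) (out : List Int) : Decidable (Spec_solve s out) := by unfold Spec_solve; infer_instance

-- ===== CLAIM (what is proved, stated in full; the proofs are below) =====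
def Claim_equal_solve : Prop := ∀ (s : String), Dom_solve s → Pre_solve s → Spec_solve s (solve s)

-- ===== LEMMAS AND PROOFS =====

-- the run structure both proofs are reduced to
def pvTakeRun (c : Char) : List Char → Nat × List Char
  | [] => (0, [])
  | d :: rest =>
    if d == c then
      let p := pvTakeRun c rest
      (p.1 + 1, p.2)
    else (0, d :: rest)

lemma pvTakeRun_snd_length (c : Char) (l : List Char) : (pvTakeRun c l).2.length ≤ l.length := by
  induction l with
  | nil => simp [pvTakeRun]
  | cons d rest ih =>
    by_cases h : (d == c) = true
    · simp [pvTakeRun, h]; omega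
    · simp [pvTakeRun, h]

lemma pvTakeRun_replicate (c : Char) (l : List Char) :
    c :: l = List.replicate ((pvTakeRun c l).1 + 1) c ++ (pvTakeRun c l).2 := by
  induction l with
  | nil => simp [pvTakeRun]
  | cons d rest ih =>
    by_cases h : (d == c) = true
    · have hd : d = c := eq_of_beq h
      subst hd
      simp only [pvTakeRun, h, if_pos]
      rw [List.replicate_succ]
      simpa using ih
    · simp [pvTakeRun, h]

lemma pvTakeRun_head (c : Char) (l : List Char) :
    (pvTakeRun c l).2 = [] ∨ ∃ d t, (pvTakeRun c l).2 = d :: t ∧ (d == c) = false := by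
  induction l with
  | nil => simp [pvTakeRun]
  | cons d rest ih =>
    by_cases h : (d == c) = true
    · simpa [pvTakeRun, h] using ih
    · exact Or.inr ⟨d, rest, by simp [pvTakeRun, h], by simp [h]⟩

-- canonical run-by-run expansion: the value both ports are proved equal to (as a list)
def pvExpand : List Char → List Int
  | [] => []
  | c :: rest =>
    ((PySem.List.pyRange 1 (((pvTakeRun c rest).1 : Int) + 1 + 1) 1).map (fun k => k * pvAlpha c))
      ++ pvExpand (pvTakeRun c rest).2
termination_by l => l.length
decreasing_by
  have := pvTakeRun_snd_length c rest
  simp; omega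

-- ---- A side ----

def pvStreamA (prev : Char) (x : Int) : List Char → List Int
  | [] => []
  | c :: rest =>
    let x' := if c == prev then x + 1 else 1
    x' * pvAlpha c :: pvStreamA c x' rest

lemma loopA_eq_foldl (l : List Char) : ∀ (prev : Char) (x : Int) (sc : PySem.Set Int),
    solveLoopA prev x sc l = (pvStreamA prev x l).foldl PySem.Set.add sc := by
  induction l with
  | nil => intro prev x sc; simp [solveLoopA, pvStreamA]
  | cons c rest ih => intro prev x sc; simp only [solveLoopA, pvStreamA, List.foldl_cons]; exact ih ..

theorem streamA_run : ∀ (l : List Char) (c : Char) (x : Int),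
    pvStreamA c x l =
      ((PySem.List.pyRange (x + 1) (x + 1 + ((pvTakeRun c l).1 : Int)) 1).map (fun k => k * pvAlpha c))
        ++ pvExpand (pvTakeRun c l).2
  | [], c, x => by
    simp [pvStreamA, pvTakeRun, PySem.List.pyRange_one_eq_nil, pvExpand]
  | d :: rest, c, x => by
    by_cases h : (d == c) = true
    · have hd : d = c := eq_of_beq h
      subst hd
      simp only [pvStreamA, h, if_pos, pvTakeRun]
      rw [streamA_run rest d (x + 1)]
      rw [PySem.List.pyRange_one_cons
        (show (x + 1 : Int) < x + 1 + (((pvTakeRun d rest).1 + 1 : Nat) : Int) by push_cast; omega)]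
      have hb : x + 1 + (((pvTakeRun d rest).1 + 1 : Nat) : Int)
          = x + 1 + 1 + ((pvTakeRun d rest).1 : Int) := by push_cast; ring
      rw [hb]
      simp only [List.map_cons, List.cons_append]
    · simp only [pvStreamA, pvTakeRun, h, Bool.false_eq_true, if_false]
      have hnil : PySem.List.pyRange (x + 1) (x + 1 + ((0 : Nat) : Int)) 1 = [] := by
        apply PySem.List.pyRange_one_eq_nil; simp
      rw [hnil]
      simp only [List.map_nil, List.nil_append]
      rw [streamA_run rest d 1]
      simp only [pvExpand]
      rw [PySem.List.pyRange_one_cons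
        (show (1 : Int) < ((pvTakeRun d rest).1 : Int) + 1 + 1 by omega)]
      simp only [List.map_cons, one_mul]
      rw [show ((pvTakeRun d rest).1 : Int) + 1 + 1 = 1 + 1 + ((pvTakeRun d rest).1 : Int) from by ring,
        List.cons_append]

-- ---- B side ----

-- index shift across an append (indices stay nonnegative, so no Python wraparound)
lemma pyGetD_append_shift (u t : List Char) (j : Int) (d : Char) (hj : 0 ≤ j) :
    PySem.List.pyGetD (u ++ t) (j + (u.length : Int)) d = PySem.List.pyGetD t j d := by
  obtain ⟨m, rfl⟩ : ∃ m : Nat, j = (m : Int) := ⟨j.toNat, (Int.toNat_of_nonneg hj).symm⟩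
  have h1 : ((m : Int) + (u.length : Int)) = (((m + u.length : Nat)) : Int) := by push_cast; ring
  rw [h1, PySem.List.pyGetD_natCast, PySem.List.pyGetD_natCast]
  simp [List.getD, List.getElem?_append_right (show u.length ≤ m + u.length by omega)]

lemma pyRange_shift (a b t : Int) :
    PySem.List.pyRange (a + t) (b + t) 1 = (PySem.List.pyRange a b 1).map (· + t) := by
  rw [PySem.List.pyRange_one, PySem.List.pyRange_one]
  have : (b + t - (a + t)) = b - a := by ring
  rw [this, List.map_map]
  exact List.map_congr_left (fun k _ => by simp; ring)

lemma cuts_nonneg (cs : List Char) : ∀ i ∈ pvCuts cs, 0 ≤ i := by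
  intro i hi
  have := (List.mem_filter.mp hi).1
  have := (PySem.List.mem_pyRange_one.mp this).1
  omega

lemma pyGetD_replicate_left (M : Nat) (c : Char) (t : List Char) (j : Int)
    (h0 : 0 ≤ j) (hM : j < (M : Int)) :
    PySem.List.pyGetD (List.replicate M c ++ t) j ' ' = c := by
  obtain ⟨n, rfl⟩ : ∃ n : Nat, j = (n : Int) := ⟨j.toNat, (Int.toNat_of_nonneg h0).symm⟩
  have hn : n < M := by exact_mod_cast hM
  rw [PySem.List.pyGetD_natCast]
  simp [List.getD, List.getElem?_append_left (show n < (List.replicate M c).length by simpa using hn),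
    List.getElem?_replicate, hn]

-- peel one maximal run off the boundary-index comprehension
lemma cuts_peel (c : Char) (rest : List Char) :
    pvCuts (c :: rest) =
      (if (pvTakeRun c rest).2 = [] then []
       else (((pvTakeRun c rest).1 : Int) + 1) ::
         (pvCuts (pvTakeRun c rest).2).map (· + (((pvTakeRun c rest).1 : Int) + 1))) := by
  set m := (pvTakeRun c rest).1 with hm
  set t := (pvTakeRun c rest).2 with ht
  set M : Nat := m + 1 with hMdef
  have hMint : ((M : Nat) : Int) = (m : Int) + 1 := by push_cast [hMdef]; ring
  have hrep : c :: rest = List.replicate M c ++ t := pvTakeRun_replicate c rest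
  have hlen : ((c :: rest).length : Int) = (M : Int) + (t.length : Int) := by
    rw [hrep]; push_cast; simp
  have hpredrep : ∀ i ∈ PySem.List.pyRange 1 (M : Int) 1,
      (!(PySem.List.pyGetD (c :: rest) i ' ' == PySem.List.pyGetD (c :: rest) (i - 1) ' ')) = false := by
    intro i hi
    obtain ⟨h1, h2⟩ := PySem.List.mem_pyRange_one.mp hi
    rw [hrep, pyGetD_replicate_left M c t i (by omega) h2,
      pyGetD_replicate_left M c t (i - 1) (by omega) (by omega)]
    simp
  unfold pvCuts
  rw [hlen, PySem.List.pyRange_one_append 1 (M : Int) ((M : Int) + (t.length : Int))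
    (by omega) (by omega)]
  rw [List.filter_append, List.filter_eq_nil_iff.mpr
    (fun i hi => by simp [hpredrep i hi]), List.nil_append]
  rcases pvTakeRun_head c rest with hnil | ⟨d, t2, htd, hdc⟩
  · rw [← ht] at hnil
    rw [if_pos hnil, hnil]
    simp [PySem.List.pyRange_one_eq_nil]
  · rw [← ht] at htd
    have htne : t ≠ [] := by rw [htd]; simp
    have htlen : 0 < t.length := List.length_pos_iff.mpr htne
    rw [if_neg htne]
    rw [PySem.List.pyRange_one_cons (by omega)]
    rw [List.filter_cons]
    have hM0 : PySem.List.pyGetD (c :: rest) (M : Int) ' ' = d := by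
      have hsh := pyGetD_append_shift (List.replicate M c) t 0 ' ' le_rfl
      simp only [List.length_replicate, zero_add] at hsh
      rw [hrep, hsh, htd, PySem.List.pyGetD_zero_cons]
    have hM1 : PySem.List.pyGetD (c :: rest) ((M : Int) - 1) ' ' = c := by
      rw [hrep]
      exact pyGetD_replicate_left M c t _ (by omega) (by omega)
    rw [if_pos (by rw [hM0, hM1]; simpa using hdc)]
    rw [hMint]
    congr 1
    have hsh : PySem.List.pyRange ((m : Int) + 1 + 1) ((m : Int) + 1 + (t.length : Int)) 1
        = (PySem.List.pyRange 1 (t.length : Int) 1).map (· + ((m : Int) + 1)) := by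
      rw [← pyRange_shift 1 (t.length : Int) ((m : Int) + 1)]
      congr 1 <;> ring
    rw [hsh, List.filter_map]
    congr 1
    apply List.filter_congr
    intro i hi
    obtain ⟨h1, h2⟩ := PySem.List.mem_pyRange_one.mp hi
    simp only [Function.comp]
    have e1 : PySem.List.pyGetD (c :: rest) (i + ((m : Int) + 1)) ' ' = PySem.List.pyGetD t i ' ' := by
      rw [hrep, ← hMint]
      have := pyGetD_append_shift (List.replicate M c) t i ' ' (by omega)
      simpa using this
    have e2 : PySem.List.pyGetD (c :: rest) (i + ((m : Int) + 1) - 1) ' ' = PySem.List.pyGetD t (i - 1) ' ' := by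
      rw [hrep, ← hMint]
      have := pyGetD_append_shift (List.replicate M c) t (i - 1) ' ' (by omega)
      simp only [List.length_replicate] at this ⊢
      rw [show i + ((M : Nat) : Int) - 1 = i - 1 + ((M : Nat) : Int) by ring, this]
    rw [e1, e2]

theorem prods_expand : ∀ (cs : List Char),
    pvProds cs (0 :: pvCuts cs ++ [(cs.length : Int)]) = pvExpand cs
  | [] => by
    simp [pvProds, pvCuts, pvExpand, PySem.List.pyRange_one_eq_nil]
  | c :: rest => by
    have hcp := cuts_peel c rest
    have hrep := pvTakeRun_replicate c rest
    set m := (pvTakeRun c rest).1 with hm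
    set t := (pvTakeRun c rest).2 with ht
    set M : Nat := m + 1 with hMdef
    have hMint : ((M : Nat) : Int) = (m : Int) + 1 := by push_cast [hMdef]; ring
    have hlen : ((c :: rest).length : Int) = (M : Int) + (t.length : Int) := by
      rw [hrep]; push_cast; simp
    have hget0 : PySem.List.pyGetD (c :: rest) 0 ' ' = c := PySem.List.pyGetD_zero_cons ..
    have hexp : pvExpand (c :: rest)
        = ((PySem.List.pyRange 1 ((m : Int) + 1 + 1) 1).map (fun k => k * pvAlpha c)) ++ pvExpand t := by
      rw [pvExpand]
    rcases eq_or_ne t [] with hnil | htne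
    · rw [if_pos hnil] at hcp
      have hlen0 : ((c :: rest).length : Int) = (M : Int) := by rw [hlen, hnil]; simp
      rw [hcp, hlen0, hexp, hnil]
      unfold pvProds
      simp only [pvExpand, List.nil_append]
      simp only [List.cons_append, List.nil_append]
      simp only [List.drop_succ_cons, List.drop_zero, List.drop_nil, List.zip_cons_cons,
        List.zip_nil_right, List.flatMap_cons, List.flatMap_nil, List.append_nil, hget0]
      rw [show (M : Int) - 0 + 1 = (m : Int) + 1 + 1 by omega]
      rfl
    · rw [if_neg htne] at hcp
      have hrec := prods_expand t
      rw [hexp, ← hrec]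
      have hbounds : 0 :: pvCuts (c :: rest) ++ [((c :: rest).length : Int)]
          = 0 :: ((0 :: pvCuts t ++ [(t.length : Int)]).map (· + ((m : Int) + 1))) := by
        rw [hcp, hlen, hMint]
        simp [add_comm]
      rw [hbounds]
      unfold pvProds
      simp only [List.map_cons, List.map_append, List.map_nil, zero_add, List.drop_succ_cons,
        List.drop_zero, List.cons_append]
      rw [List.zip_cons_cons, List.flatMap_cons]
      congr 1
      · rw [hget0, show (m : Int) + 1 - 0 + 1 = (m : Int) + 1 + 1 by ring]
        rfl
      · -- remaining pairs: all shifted by m+1; translate back into t-local indices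
        have hv : List.map (fun x => x + ((m : Int) + 1)) (pvCuts t) ++ [(t.length : Int) + ((m : Int) + 1)]
            = List.map (fun x => x + ((m : Int) + 1)) (pvCuts t ++ [(t.length : Int)]) := by simp
        have hu : ((m : Int) + 1) :: List.map (fun x => x + ((m : Int) + 1)) (pvCuts t ++ [(t.length : Int)])
            = List.map (fun x => x + ((m : Int) + 1)) (0 :: (pvCuts t ++ [(t.length : Int)])) := by simp
        have hd1 : List.drop 1 (0 :: (pvCuts t ++ [(t.length : Int)])) = pvCuts t ++ [(t.length : Int)] := rfl
        rw [hv, hu, ← hd1, List.zip_map, List.flatMap_map, hd1]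
        apply List.flatMap_congr
        intro p hp
        have hp1 : p.1 ∈ 0 :: (pvCuts t ++ [(t.length : Int)]) := (List.of_mem_zip hp).1
        have hp1nn : 0 ≤ p.1 := by
          rcases List.mem_cons.mp hp1 with h | h
          · omega
          · rcases List.mem_append.mp h with h | h
            · exact cuts_nonneg t p.1 h
            · simp at h; omega
        have eget : PySem.List.pyGetD (c :: rest) (p.1 + ((m : Int) + 1)) ' '
            = PySem.List.pyGetD t p.1 ' ' := by
          rw [hrep, ← hMint]
          have := pyGetD_append_shift (List.replicate M c) t p.1 ' ' hp1nn
          simpa using this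
        simp only [Prod.map, Function.comp]
        rw [eget, show p.2 + ((m : Int) + 1) - (p.1 + ((m : Int) + 1)) + 1 = p.2 - p.1 + 1 by ring]
termination_by cs => cs.length
decreasing_by
  have := pvTakeRun_snd_length c rest
  simp; omega

-- ===== VERDICT (by name: the statements are the Claim_ definitions above) =====
theorem solve_spec : Claim_equal_solve := by
  intro s _hdom hpre
  unfold Spec_solve solve solve_alt
  cases hcs : s.toList with
  | nil =>
    exact absurd (by simpa using congrArg String.ofList hcs) hpre
  | cons c rest =>
    dsimp only
    rw [prods_expand (c :: rest), PySem.Set.ofList_eq_foldl]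
    have hfold := loopA_eq_foldl rest c 1 (PySem.Set.add PySem.Set.empty (pvAlpha c))
    rw [hfold]
    have hstream : pvAlpha c :: pvStreamA c 1 rest = pvExpand (c :: rest) := by
      rw [streamA_run rest c 1, pvExpand]
      rw [PySem.List.pyRange_one_cons
        (show (1 : Int) < ((pvTakeRun c rest).1 : Int) + 1 + 1 by omega)]
      simp only [List.map_cons, one_mul]
      rw [show ((pvTakeRun c rest).1 : Int) + 1 + 1 = 1 + 1 + ((pvTakeRun c rest).1 : Int) by ring]
      rw [List.cons_append]
    rw [← hstream]
    rfl
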